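-- pv_equiv track=rewrite | github.com/steven-martins/GoogleCodeJam2016 | Qualification Round/codejam_4.py | fractal
-- ===== SOURCE A (Python) =====
-- def fractal(pattern, comp):
--     #s = list(pattern)
--     s = pattern
--     #pattern = list(pattern)
--     for loop in range(comp - 1):
--         tmp = ""
--         for i in range(len(s)):
--             tmp += "G" * len(pattern) if s[i] == "G" else pattern
--         s = tmp
--     return s
-- ===== SOURCE B (Python) =====
-- def fractal(pattern, comp):
--     # Depth-synchronous expansion: instead of rewriting the whole string each
--     # round, maintain only the full expansion g of a 'G' and p of any non-'G'
--     # char at the current depth, then assemble the answer from the pattern once.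
--     if comp <= 1:
--         return pattern
--     L = len(pattern)
--     g, p = "G" * L, pattern
--     for _ in range(comp - 2):
--         g, p = g * L, "".join(g if ch == "G" else p for ch in pattern)
--     return "".join(g if ch == "G" else p for ch in pattern)
-- ===== Notes on version B (the rewrite author's own statement) =====
-- stated objective: alternative
-- what changed: A repeatedly rewrites the whole string round by round; B maintains only two strings per depth (the expansion of 'G' and of a generic non-'G' character) and assembles the answer from the pattern once at the end.
import Mathlib
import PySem

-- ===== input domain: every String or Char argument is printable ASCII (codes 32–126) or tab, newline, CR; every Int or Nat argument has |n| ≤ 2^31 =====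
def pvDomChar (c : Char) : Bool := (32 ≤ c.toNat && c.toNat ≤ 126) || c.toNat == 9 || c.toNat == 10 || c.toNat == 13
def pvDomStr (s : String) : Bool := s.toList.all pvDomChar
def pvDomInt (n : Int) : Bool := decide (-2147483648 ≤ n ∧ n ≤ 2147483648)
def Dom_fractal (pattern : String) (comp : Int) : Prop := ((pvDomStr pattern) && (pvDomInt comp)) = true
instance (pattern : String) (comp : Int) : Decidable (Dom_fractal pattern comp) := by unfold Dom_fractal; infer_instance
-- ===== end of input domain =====

-- B replaces A's round-by-round rewrite of the whole string by a pair of per-character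
-- expansions (of 'G' and of a generic non-'G' char) assembled once at the end (objective: alternative).

-- ===== PORT A =====
-- for loop in range(comp-1): tmp = ""; for i in range(len(s)): tmp += "G"*len(pattern) if s[i]=="G" else pattern; s = tmp
def fractal (pattern : String) (comp : Int) : String :=
  String.ofList
    ((PySem.List.pyRange 0 (comp - 1) 1).foldl (fun s _ =>
      (PySem.List.pyRange 0 (PySem.List.len s) 1).foldl (fun tmp i =>
        tmp ++ (if PySem.List.pyGetD s i ' ' = 'G'
                then PySem.List.pyRepeat ['G'] (PySem.List.len pattern.toList)
                else pattern.toList)) []) pattern.toList)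

-- ===== PORT B =====
-- if comp <= 1: return pattern;  g, p = "G"*L, pattern;  comp-2 rounds of
-- g, p = g*L, "".join(g if ch=="G" else p for ch in pattern);  final join once more
def fractal_alt (pattern : String) (comp : Int) : String :=
  if comp ≤ 1 then pattern
  else
    let gp :=
      (PySem.List.pyRange 0 (comp - 2) 1).foldl (fun gp _ =>
        (PySem.List.pyRepeat gp.1 (PySem.List.len pattern.toList),
         pattern.toList.flatMap (fun ch => if ch = 'G' then gp.1 else gp.2)))
        (PySem.List.pyRepeat ['G'] (PySem.List.len pattern.toList), pattern.toList)
    String.ofList (pattern.toList.flatMap (fun ch => if ch = 'G' then gp.1 else gp.2))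

-- ===== PRECONDITION & SPEC =====
def Spec_fractal (pattern : String) (comp : Int) (out : String) : Prop := out = fractal_alt pattern comp
instance (pattern : String) (comp : Int) (out : String) : Decidable (Spec_fractal pattern comp out) := by unfold Spec_fractal; infer_instance

-- ===== CLAIM (what is proved, stated in full; the proofs are below) =====
def Claim_equal_fractal : Prop := ∀ (pattern : String) (comp : Int), Dom_fractal pattern comp → Spec_fractal pattern comp (fractal pattern comp)

-- ===== LEMMAS AND PROOFS =====

-- one rewrite round of A, at the List Char level
def fstep (P s : List Char) : List Char :=
  s.flatMap (fun c => if c = 'G' then List.replicate P.length 'G' else P)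

theorem foldl_range_const {α : Type} (f : α → α) (m : ℕ) (init : α) :
    (List.range m).foldl (fun acc _ => f acc) init = f^[m] init := by
  induction m with
  | zero => simp
  | succ k ih => rw [List.range_succ, List.foldl_append, ih, List.foldl_cons, List.foldl_nil,
      Function.iterate_succ_apply']

theorem foldl_pyRange_const {α : Type} (f : α → α) (n : Int) (init : α) :
    (PySem.List.pyRange 0 n 1).foldl (fun acc _ => f acc) init = f^[n.toNat] init := by
  rw [PySem.List.pyRange_one, List.foldl_map, sub_zero]
  exact foldl_range_const f n.toNat init

theorem flatten_replicate_replicate (m L : ℕ) (c : Char) :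
    (List.replicate m (List.replicate L c)).flatten = List.replicate (m * L) c := by
  induction m with
  | zero => simp
  | succ k ih =>
    rw [List.replicate_succ, List.flatten_cons, ih, Nat.succ_mul, Nat.add_comm, List.replicate_add]

theorem fstep_replicate_G (P : List Char) (m : ℕ) :
    fstep P (List.replicate m 'G') = List.replicate (m * P.length) 'G' := by
  simp only [fstep, List.flatMap_replicate]
  exact flatten_replicate_replicate m P.length 'G'

theorem fstep_flatMap {α : Type} (P : List Char) (xs : List α) (f : α → List Char) :
    fstep P (xs.flatMap f) = xs.flatMap (fun x => fstep P (f x)) := by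
  simp only [fstep, List.flatMap_assoc]

-- the crux: one round applied to the k-fold expansion, expressed per top-level pattern char
theorem fstep_iterate_eq (P : List Char) (k : ℕ) :
    fstep P ((fstep P)^[k] P) =
      P.flatMap (fun c => if c = 'G' then List.replicate (P.length ^ (k + 1)) 'G'
                          else (fstep P)^[k] P) := by
  induction k with
  | zero =>
    simp only [Function.iterate_zero, id_eq, fstep, zero_add, pow_one]
  | succ k ih =>
    rw [Function.iterate_succ_apply', ih, fstep_flatMap]
    apply List.flatMap_congr
    intro c _
    by_cases hc : c = 'G'
    · subst hc
      rw [if_pos rfl, if_pos rfl, fstep_replicate_G, ← pow_succ]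
    · rw [if_neg hc, if_neg hc]
      exact ih

-- A's whole computation at the list level
theorem fractal_eq_iterate (pattern : String) (comp : Int) :
    fractal pattern comp = String.ofList ((fstep pattern.toList)^[(comp - 1).toNat] pattern.toList) := by
  unfold fractal
  congr 1
  have hbody : ∀ s : List Char,
      (PySem.List.pyRange 0 (PySem.List.len s) 1).foldl (fun tmp i =>
        tmp ++ (if PySem.List.pyGetD s i ' ' = 'G'
                then PySem.List.pyRepeat ['G'] (PySem.List.len pattern.toList)
                else pattern.toList)) [] = fstep pattern.toList s := by
    intro s
    rw [PySem.List.foldl_pyRange_zero_pyGetD s ' '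
        (fun tmp c => tmp ++ (if c = 'G'
                then PySem.List.pyRepeat ['G'] (PySem.List.len pattern.toList)
                else pattern.toList)) []]
    rw [PySem.List.foldl_append_eq_flatMap]
    simp [fstep, PySem.List.pyRepeat, PySem.List.len]
  calc (PySem.List.pyRange 0 (comp - 1) 1).foldl (fun s _ =>
          (PySem.List.pyRange 0 (PySem.List.len s) 1).foldl (fun tmp i =>
            tmp ++ (if PySem.List.pyGetD s i ' ' = 'G'
                    then PySem.List.pyRepeat ['G'] (PySem.List.len pattern.toList)
                    else pattern.toList)) []) pattern.toList
      = (PySem.List.pyRange 0 (comp - 1) 1).foldl (fun s _ => fstep pattern.toList s) pattern.toList := by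
        simp only [hbody]
    _ = (fstep pattern.toList)^[(comp - 1).toNat] pattern.toList :=
        foldl_pyRange_const (fstep pattern.toList) (comp - 1) pattern.toList

-- B's loop invariant
theorem alt_invariant (P : List Char) (k : ℕ) :
    (fun gp : List Char × List Char =>
        (PySem.List.pyRepeat gp.1 (PySem.List.len P),
         P.flatMap (fun ch => if ch = 'G' then gp.1 else gp.2)))^[k]
      (PySem.List.pyRepeat ['G'] (PySem.List.len P), P)
    = (List.replicate (P.length ^ (k + 1)) 'G', (fstep P)^[k] P) := by
  induction k with
  | zero =>
    simp [PySem.List.pyRepeat, PySem.List.len, pow_one]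
  | succ k ih =>
    rw [Function.iterate_succ_apply', ih]
    dsimp only
    rw [Prod.mk.injEq]
    constructor
    · simp only [PySem.List.pyRepeat, PySem.List.len]
      rw [Int.toNat_natCast, flatten_replicate_replicate, ← pow_succ']
    · rw [← fstep_iterate_eq, ← Function.iterate_succ_apply' (fstep P) k P]

-- ===== VERDICT (by name: the statement is the Claim_ definition above) =====
theorem fractal_spec : Claim_equal_fractal := by
  intro pattern comp _
  unfold Spec_fractal
  rw [fractal_eq_iterate]
  unfold fractal_alt
  by_cases h : comp ≤ 1
  · rw [if_pos h]
    have h0 : (comp - 1).toNat = 0 := by omega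
    simp [h0]
  · rw [if_neg h]
    simp only [foldl_pyRange_const
      (fun gp : List Char × List Char =>
        (PySem.List.pyRepeat gp.1 (PySem.List.len pattern.toList),
         pattern.toList.flatMap (fun ch => if ch = 'G' then gp.1 else gp.2)))
      (comp - 2)
      (PySem.List.pyRepeat ['G'] (PySem.List.len pattern.toList), pattern.toList),
      alt_invariant pattern.toList (comp - 2).toNat]
    rw [← fstep_iterate_eq, ← Function.iterate_succ_apply' (fstep pattern.toList) (comp - 2).toNat pattern.toList]
    have h1 : (comp - 1).toNat = (comp - 2).toNat + 1 := by omega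
    rw [h1]
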